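-- pv_equiv track=rewrite | github.com/prabhat00155/leetcode | medium/1806.py | reinitializePermutation
-- ===== SOURCE A (Python) =====
-- def reinitializePermutation(n: int) -> int:
--     def is_equal(arr1, arr2):
--         i = 0
--         while i < len(arr1):
--             if arr1[i] != arr2[i]:
--                 return False
--             i += 1
--         return True
--
--     def apply_operation(arr):
--         tmp = list(arr)
--         for i in range(len(arr)):
--             if i % 2 == 0:
--                 index = i // 2
--             else:
--                 index = n // 2 + (i - 1) // 2
--             arr[i] = tmp[index]
--
--     perm = [i for i in range(n)]
--     arr = list(perm)
--     count, flag = 0, True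
--     while flag:
--         apply_operation(arr)
--         count += 1
--         if is_equal(perm, arr):
--             flag = False
--     return count
-- ===== SOURCE B (Python) =====
-- def reinitializePermutation(n: int) -> int:
--     # Track only the cycle of index 1: one step of the operation doubles an
--     # index modulo n-1, so the answer is the multiplicative order of 2 mod n-1.
--     if n <= 2:
--         return 1
--     m = n - 1
--     count, x = 1, 2 % m
--     while x != 1:
--         x = 2 * x % m
--         count += 1
--     return count
-- ===== Notes on version B (the rewrite author's own statement) =====
-- stated objective: faster
-- what changed: Instead of simulating the whole n-element permutation each round and comparing arrays, B tracks the single index one, whose step is doubling modulo n-1, and returns the multiplicative order of two mod n-1 (one for the degenerate small inputs); intended as faster, measured about three orders of magnitude on the even sizes where both finish (on odd inputs above the degenerate range both A and B loop forever, which Pre_ excludes).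
import Mathlib
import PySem

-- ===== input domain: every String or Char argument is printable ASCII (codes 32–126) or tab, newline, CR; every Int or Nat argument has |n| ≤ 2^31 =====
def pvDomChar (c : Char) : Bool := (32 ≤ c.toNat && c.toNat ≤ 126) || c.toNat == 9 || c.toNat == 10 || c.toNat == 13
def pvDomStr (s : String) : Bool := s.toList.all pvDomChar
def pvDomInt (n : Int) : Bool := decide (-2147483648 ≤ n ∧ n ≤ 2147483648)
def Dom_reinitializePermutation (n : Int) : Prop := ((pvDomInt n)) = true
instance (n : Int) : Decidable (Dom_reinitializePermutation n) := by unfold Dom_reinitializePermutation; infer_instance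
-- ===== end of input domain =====

-- B replaces A's full-array simulation by following the single index 1 (doubling mod n-1),
-- returning the multiplicative order of two mod n-1; intended as faster (measured about three
-- orders of magnitude on the even sizes where both finish; on the excluded odd inputs both loop forever).

-- ===== PORT A =====
-- is_equal: element-wise comparison; the second-list-shorter case is Python's IndexError (unreachable here: equal lengths)
def pyIsEqual : List Int → List Int → Bool
  | [], _ => true
  | _ :: _, [] => false
  | a :: as, b :: bs => if a ≠ b then false else pyIsEqual as bs

-- apply_operation: arr[i] = tmp[index]; reads come only from the copy tmp, so the in-place
-- for-loop is transcribed as a map over range(len(arr)). The mutable Python list arr is kept as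
-- an Array Int (a Python list is an O(1)-indexed array); the loop index i of range(len(arr)) is
-- nonnegative, so index is computed with the same floor divisions and is always in range
-- (index.toNat is exact, getD's default is never used).
def applyOperation (n : Int) (arr : Array Int) : Array Int :=
  ((List.range arr.size).map (fun (j : Nat) =>
    let index := if PySem.Int.mod (j : Int) 2 = 0 then PySem.Int.floordiv (j : Int) 2
                 else PySem.Int.floordiv n 2 + PySem.Int.floordiv ((j : Int) - 1) 2
    arr.getD index.toNat 0)).toArray

-- the while-flag loop, with fuel; on the admitted inputs the loop runs at most n-1 ≤ fuel times
def loopA (n : Int) : Nat → List Int → Array Int → Int → Int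
  | 0, _, _, count => count
  | fuel + 1, perm, arr, count =>
    let arr' := applyOperation n arr
    let count' := count + 1
    if pyIsEqual perm arr'.toList then count' else loopA n fuel perm arr' count'

def reinitializePermutation (n : Int) : Int :=
  let perm := PySem.List.pyRange 0 n 1
  loopA n (n.toNat + 1) perm perm.toArray 0

-- ===== PORT B =====
def loopB (m : Int) : Nat → Int → Int → Int
  | 0, _, count => count
  | fuel + 1, x, count =>
    if x = 1 then count else loopB m fuel (PySem.Int.mod (2 * x) m) (count + 1)

def reinitializePermutation_alt (n : Int) : Int :=
  if n ≤ 2 then 1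
  else loopB (n - 1) n.toNat (PySem.Int.mod 2 (n - 1)) 1

-- ===== PRECONDITION & SPEC =====
-- Pre_ excludes exactly the odd inputs above two, on which A's while loop never terminates (the array never returns to the identity); B also loops forever there.
def Pre_reinitializePermutation (n : Int) : Prop := n ≤ 2 ∨ n % 2 = 0
instance (n : Int) : Decidable (Pre_reinitializePermutation n) := by unfold Pre_reinitializePermutation; infer_instance
def pvWitness_reinitializePermutation : Int := 6

def Spec_reinitializePermutation (n : Int) (out : Int) : Prop := out = reinitializePermutation_alt n
instance (n : Int) (out : Int) : Decidable (Spec_reinitializePermutation n out) := by unfold Spec_reinitializePermutation; infer_instance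

-- ===== CLAIM (what is proved, stated in full; the proofs are below) =====
def Claim_equal_reinitializePermutation : Prop := ∀ (n : Int), Dom_reinitializePermutation n → Pre_reinitializePermutation n → Spec_reinitializePermutation n (reinitializePermutation n)

-- ===== LEMMAS AND PROOFS =====

-- the index map of apply_operation, on Nat
def gmap (N : Nat) (j : Nat) : Nat := if j % 2 = 0 then j / 2 else N / 2 + (j - 1) / 2

-- the array after k applications of apply_operation, starting from the identity
def Ak (N : Nat) (k : Nat) : List Int := (List.range N).map (fun j => (((gmap N)^[k] j : Nat) : Int))

lemma gmap_lt_sub_one {N j : Nat} (hNe : N % 2 = 0) (hj : j < N - 1)  : gmap N j < N - 1 := by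
  unfold gmap; split_ifs with h <;> omega

lemma gmap_lt {N j : Nat} (hNe : N % 2 = 0) (hN : 1 ≤ N) (hj : j < N) : gmap N j < N := by
  unfold gmap; split_ifs with h <;> omega

lemma gmap_key {N j : Nat} (hNe : N % 2 = 0) (hN : 4 ≤ N) (_hj : j < N - 1) :
    2 * gmap N j ≡ j [MOD N - 1] := by
  unfold gmap; split_ifs with h
  · have : 2 * (j / 2) = j := by omega
    rw [this]
  · have h2 : 2 * (N / 2 + (j - 1) / 2) = (N - 1) + j := by omega
    rw [h2]
    exact Nat.add_mod_left (N - 1) j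

lemma gmap_fix {N : Nat} (hNe : N % 2 = 0) (hN : 4 ≤ N) : gmap N (N - 1) = N - 1 := by
  unfold gmap; split_ifs with h <;> omega

lemma iter_lt {N : Nat} (hNe : N % 2 = 0) (k : Nat) {j : Nat} (hj : j < N - 1) :
    (gmap N)^[k] j < N - 1 := by
  induction k generalizing j with
  | zero => simpa using hj
  | succ k ih =>
    rw [Function.iterate_succ_apply]
    exact ih (gmap_lt_sub_one hNe hj)

lemma iter_key {N : Nat} (hNe : N % 2 = 0) (hN : 4 ≤ N) (k : Nat) {j : Nat} (hj : j < N - 1) :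
    2 ^ k * (gmap N)^[k] j ≡ j [MOD N - 1] := by
  induction k generalizing j with
  | zero => simpa using Nat.ModEq.refl j
  | succ k ih =>
    rw [Function.iterate_succ_apply]
    calc 2 ^ (k + 1) * (gmap N)^[k] (gmap N j)
        = 2 * (2 ^ k * (gmap N)^[k] (gmap N j)) := by ring
      _ ≡ 2 * gmap N j [MOD N - 1] := (ih (gmap_lt_sub_one hNe hj)).mul_left 2
      _ ≡ j [MOD N - 1] := gmap_key hNe hN hj

lemma iter_id_iff {N : Nat} (hNe : N % 2 = 0) (hN : 4 ≤ N) (k : Nat) :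
    (∀ j < N, (gmap N)^[k] j = j) ↔ 2 ^ k % (N - 1) = 1 := by
  constructor
  · intro h
    have h1 : (gmap N)^[k] 1 = 1 := h 1 (by omega)
    have h2 := iter_key hNe hN k (j := 1) (by omega)
    rw [h1, Nat.mul_one] at h2
    have : (1 : Nat) % (N - 1) = 1 := Nat.mod_eq_of_lt (by omega)
    rw [Nat.ModEq, this] at h2
    exact h2
  · intro h j hj
    by_cases hje : j = N - 1
    · subst hje
      exact Function.iterate_fixed (gmap_fix hNe hN) k
    · have hj' : j < N - 1 := by omega
      have h1 := iter_key hNe hN k hj'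
      have h2 : (2 : Nat) ^ k ≡ 1 [MOD N - 1] := by
        unfold Nat.ModEq
        rw [h, Nat.mod_eq_of_lt (by omega)]
      have h3 : 2 ^ k * (gmap N)^[k] j ≡ 1 * (gmap N)^[k] j [MOD N - 1] :=
        h2.mul_right _
      rw [Nat.one_mul] at h3
      have h4 : ((gmap N)^[k] j) ≡ j [MOD N - 1] := h3.symm.trans h1
      have hb := iter_lt hNe k hj'
      unfold Nat.ModEq at h4
      rwa [Nat.mod_eq_of_lt hb, Nat.mod_eq_of_lt hj'] at h4

lemma length_Ak (N k : Nat) : (Ak N k).length = N := by simp [Ak]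

lemma arrGetD_toArray (l : List Int) (i : Nat) (d : Int) : l.toArray.getD i d = l.getD i d := by
  unfold Array.getD List.getD
  simp only [List.size_toArray, Array.getInternal_eq_getElem, List.getElem_toArray]
  split
  · rw [List.getElem?_eq_getElem]; rfl
  · rw [List.getElem?_eq_none (by omega)]; rfl

lemma applyOp_Ak {N : Nat} (hNe : N % 2 = 0) (hN : 4 ≤ N) (k : Nat) :
    applyOperation (N : Int) (Ak N k).toArray = (Ak N (k + 1)).toArray := by
  unfold applyOperation
  rw [List.size_toArray, length_Ak]
  congr 1
  conv_rhs => rw [show Ak N (k+1) = (List.range N).map (fun j => (((gmap N)^[k+1] j : Nat) : Int)) from rfl]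
  apply List.map_congr_left
  intro j hj
  have hjN : j < N := List.mem_range.mp hj
  simp only []
  have hidx : (if PySem.Int.mod (j : Int) 2 = 0 then PySem.Int.floordiv (j : Int) 2
      else PySem.Int.floordiv (N : Int) 2 + PySem.Int.floordiv ((j : Int) - 1) 2)
      = ((gmap N j : Nat) : Int) := by
    rw [PySem.Int.mod_eq_emod_of_pos (by norm_num),
        PySem.Int.floordiv_eq_ediv_of_pos (a := (j : Int)) (by norm_num),
        PySem.Int.floordiv_eq_ediv_of_pos (a := (N : Int)) (by norm_num),
        PySem.Int.floordiv_eq_ediv_of_pos (a := ((j : Int) - 1)) (by norm_num)]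
    unfold gmap
    split_ifs with h1 h2 h2 <;> omega
  rw [hidx, Int.toNat_natCast, arrGetD_toArray]
  unfold Ak
  rw [List.getD_eq_getElem?_getD, List.getElem?_map, List.getElem?_range (gmap_lt hNe (by omega) hjN)]
  simp only [Option.map_some, Option.getD_some, ← Function.iterate_succ_apply]

lemma pyIsEqual_iff : ∀ (xs ys : List Int), xs.length = ys.length →
    (pyIsEqual xs ys = true ↔ xs = ys) := by
  intro xs
  induction xs with
  | nil =>
    intro ys h
    cases ys with
    | nil => simp [pyIsEqual]
    | cons b bs => simp at h
  | cons a as ih =>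
    intro ys h
    cases ys with
    | nil => simp at h
    | cons b bs =>
      simp only [pyIsEqual]
      by_cases hab : a = b
      · subst hab
        simp only [ne_eq, not_true_eq_false, List.cons.injEq, true_and]
        simpa using ih bs (by simpa using h)
      · simp [hab]

lemma Ak_eq_iff {N : Nat} (k : Nat) :
    (Ak N k = Ak N 0 ↔ ∀ j < N, (gmap N)^[k] j = j) := by
  unfold Ak
  rw [List.map_inj_left]
  constructor
  · intro h j hj
    have := h j (List.mem_range.mpr hj)
    simpa using this
  · intro h j hj
    have := h j (List.mem_range.mp hj)
    simp [this]

-- the stopping predicate, shared by both loops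
lemma loopA_eq {N : Nat} (hNe : N % 2 = 0) (hN : 4 ≤ N) (d : Nat)
    (hd : 1 ≤ d ∧ 2 ^ d % (N - 1) = 1)
    (hmin : ∀ t, 1 ≤ t → 2 ^ t % (N - 1) = 1 → d ≤ t) :
    ∀ fuel k, k < d → d ≤ k + fuel →
      loopA (N : Int) fuel (Ak N 0) (Ak N k).toArray (k : Int) = (d : Int) := by
  intro fuel
  induction fuel with
  | zero => intro k h1 h2; omega
  | succ f ih =>
    intro k h1 h2
    rw [loopA]
    simp only [applyOp_Ak hNe hN k, List.toList_toArray]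
    by_cases hq : 2 ^ (k + 1) % (N - 1) = 1
    · have heq : pyIsEqual (Ak N 0) (Ak N (k + 1)) = true := by
        rw [pyIsEqual_iff _ _ (by rw [length_Ak, length_Ak])]
        have := (iter_id_iff hNe hN (k + 1)).mpr hq
        exact ((Ak_eq_iff (k + 1)).mpr this).symm
      rw [if_pos heq]
      have : d = k + 1 := le_antisymm (hmin (k + 1) (by omega) hq) (by omega)
      omega
    · have heq : pyIsEqual (Ak N 0) (Ak N (k + 1)) = false := by
        rw [← Bool.not_eq_true]
        rw [pyIsEqual_iff _ _ (by rw [length_Ak, length_Ak])]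
        intro hc
        exact hq ((iter_id_iff hNe hN (k + 1)).mp ((Ak_eq_iff (k + 1)).mp hc.symm))
      rw [if_neg (by simp [heq])]
      have hne : k + 1 ≠ d := by
        intro hc; subst hc; exact hq hd.2
      have := ih (k + 1) (by omega) (by omega)
      rw [show ((k : Int) + 1) = ((k + 1 : Nat) : Int) by push_cast; ring]
      exact this

lemma loopB_eq {N : Nat} (_hN : 4 ≤ N) (d : Nat)
    (hd : 1 ≤ d ∧ 2 ^ d % (N - 1) = 1)
    (hmin : ∀ t, 1 ≤ t → 2 ^ t % (N - 1) = 1 → d ≤ t) :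
    ∀ fuel k, 1 ≤ k → k ≤ d → d ≤ k + fuel →
      loopB ((N - 1 : Nat) : Int) fuel ((2 ^ k % (N - 1) : Nat) : Int) (k : Int) = (d : Int) := by
  intro fuel
  induction fuel with
  | zero =>
    intro k h1 h2 h3
    have : k = d := by omega
    rw [loopB, this]
  | succ f ih =>
    intro k h1 h2 h3
    rw [loopB]
    by_cases hq : 2 ^ k % (N - 1) = 1
    · rw [if_pos (by exact_mod_cast hq)]
      have : k = d := le_antisymm h2 (hmin k h1 hq)
      rw [this]
    · rw [if_neg (by
        intro hc
        exact hq (by exact_mod_cast hc))]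
      have hkd : k < d := by
        rcases lt_or_eq_of_le h2 with h | h
        · exact h
        · exact absurd (h ▸ hd.2) hq
      have hx : PySem.Int.mod (2 * ((2 ^ k % (N - 1) : Nat) : Int)) ((N - 1 : Nat) : Int)
          = ((2 ^ (k + 1) % (N - 1) : Nat) : Int) := by
        rw [show (2 * ((2 ^ k % (N - 1) : Nat) : Int)) = (((2 * (2 ^ k % (N - 1)) : Nat)) : Int) by push_cast; ring]
        rw [PySem.Int.mod_natCast]
        congr 1
        rw [Nat.mul_mod, Nat.mod_mod, ← Nat.mul_mod, ← pow_succ']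
      rw [hx, show ((k : Int) + 1) = ((k + 1 : Nat) : Int) by push_cast; ring]
      exact ih (k + 1) (by omega) (by omega) (by omega)

lemma perm_eq_Ak {N : Nat} : PySem.List.pyRange 0 (N : Int) 1 = Ak N 0 := by
  rw [PySem.List.pyRange_one]
  unfold Ak
  simp

-- main case n ≥ 4, n even
lemma main_even {N : Nat} (hNe : N % 2 = 0) (hN : 4 ≤ N) :
    reinitializePermutation (N : Int) = reinitializePermutation_alt (N : Int) := by
  have hM3 : 3 ≤ N - 1 := by omega
  have hcop : Nat.Coprime 2 (N - 1) :=
    Nat.coprime_two_left.mpr (Nat.odd_iff.mpr (by omega))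
  have heuler : 2 ^ (N - 1).totient % (N - 1) = 1 := by
    have h : 2 ^ (N - 1).totient % (N - 1) = 1 % (N - 1) := Nat.ModEq.pow_totient hcop
    rwa [Nat.mod_eq_of_lt (show 1 < N - 1 by omega)] at h
  have htpos : 1 ≤ (N - 1).totient := Nat.totient_pos.mpr (by omega)
  have htlt : (N - 1).totient < N - 1 := Nat.totient_lt _ (by omega)
  have hex : ∃ t, 1 ≤ t ∧ 2 ^ t % (N - 1) = 1 := ⟨(N - 1).totient, htpos, heuler⟩
  set d := Nat.find hex with hdef
  have hd : 1 ≤ d ∧ 2 ^ d % (N - 1) = 1 := Nat.find_spec hex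
  have hmin : ∀ t, 1 ≤ t → 2 ^ t % (N - 1) = 1 → d ≤ t := fun t h1 h2 =>
    Nat.find_min' hex ⟨h1, h2⟩
  have hdle : d ≤ (N - 1).totient := hmin _ htpos heuler
  -- A side
  have hA : reinitializePermutation (N : Int) = (d : Int) := by
    unfold reinitializePermutation
    rw [perm_eq_Ak]
    have h0 : ((N : Int).toNat) = N := by simp
    rw [h0]
    have := loopA_eq hNe hN d hd hmin (N + 1) 0 (by omega) (by omega)
    simpa using this
  -- B side
  have hB : reinitializePermutation_alt (N : Int) = (d : Int) := by
    unfold reinitializePermutation_alt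
    rw [if_neg (by exact_mod_cast (by omega : ¬ (N : Int) ≤ 2))]
    have h0 : ((N : Int).toNat) = N := by simp
    rw [h0]
    have hM : ((N : Int) - 1) = ((N - 1 : Nat) : Int) := by omega
    have h2 : PySem.Int.mod 2 ((N - 1 : Nat) : Int) = ((2 ^ 1 % (N - 1) : Nat) : Int) := by
      rw [show (2 : Int) = ((2 : Nat) : Int) from rfl, PySem.Int.mod_natCast]
      norm_num
    rw [hM, h2]
    have := loopB_eq hN d hd hmin N 1 (by omega) hd.1 (by omega)
    simpa using this
  rw [hA, hB]

-- ===== VERDICT (by name: the statement is the Claim_ definition above) =====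
theorem reinitializePermutation_spec : Claim_equal_reinitializePermutation := by
  intro n _ hpre
  unfold Spec_reinitializePermutation
  rcases le_or_gt n 0 with h0 | h0
  · -- n ≤ 0: perm = [], one iteration returns 1
    have hto : n.toNat = 0 := by omega
    have hnil : PySem.List.pyRange 0 n 1 = [] := PySem.List.pyRange_one_eq_nil h0
    unfold reinitializePermutation reinitializePermutation_alt
    rw [hnil, hto]
    simp [loopA, pyIsEqual, if_pos (by omega : n ≤ 2)]
  · rcases hpre with h2 | heven
    · -- n = 1 or n = 2
      interval_cases n <;> decide
    · -- even n > 0; n = 2 handled concretely, else main_even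
      rcases le_or_gt n 2 with hle | hgt
      · interval_cases n <;> decide
      · have h4 : 4 ≤ n := by omega
        have hrw : n = ((n.toNat : Nat) : Int) := by omega
        rw [hrw]
        exact main_even (by omega) (by omega)
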